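-- pv_equiv track=rewrite | github.com/Aventus17/custom-range | custom-range.py | my_range
-- ===== SOURCE A (Python) =====
-- def my_range(stop: int, start: int = 0, step: int = 1) -> list:
--     if type(stop) == int and type(start) == int and type(step) == int:
--         if step == 0:
--             raise ValueError("my_range() arg 3 must not be zero.")
--         elif step > 0:
--             result = []
--
--             i = start
--
--             while i < stop:
--                 result.append(i)
--                 i += step
--
--             return result
--         else:
--             result = []
--
--             i = start
--
--             while i > stop:
--                 result.append(i)
--                 i += step
--
--             return result
--     else:
--         raise ValueError("An invalid value was entered.")
-- ===== SOURCE B (Python) =====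
-- def my_range(stop: int, start: int = 0, step: int = 1) -> list:
--     if not (type(stop) == int and type(start) == int and type(step) == int):
--         raise ValueError("An invalid value was entered.")
--     if step == 0:
--         raise ValueError("my_range() arg 3 must not be zero.")
--     # closed-form element count, then generate by index
--     if step > 0:
--         n = (stop - start + step - 1) // step
--     else:
--         n = (stop - start + step + 1) // step
--     n = max(n, 0)
--     return [start + i * step for i in range(n)]
-- ===== Notes on version B (the rewrite author's own statement) =====
-- stated objective: alternative
-- what changed: Replaces the two while-loops that iterate and compare against the bound with a closed-form element count followed by index generation (start + i*step for i in range(n)).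
import Mathlib
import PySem

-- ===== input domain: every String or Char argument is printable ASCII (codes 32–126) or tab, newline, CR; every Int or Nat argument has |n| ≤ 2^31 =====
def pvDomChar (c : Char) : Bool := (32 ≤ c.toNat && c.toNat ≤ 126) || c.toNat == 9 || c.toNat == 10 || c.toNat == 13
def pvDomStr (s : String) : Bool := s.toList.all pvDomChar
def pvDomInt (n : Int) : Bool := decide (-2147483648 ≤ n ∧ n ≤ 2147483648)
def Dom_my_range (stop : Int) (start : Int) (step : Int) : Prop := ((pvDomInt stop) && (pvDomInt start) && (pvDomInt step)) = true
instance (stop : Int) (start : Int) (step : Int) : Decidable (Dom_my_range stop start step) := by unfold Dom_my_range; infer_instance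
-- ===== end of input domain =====

-- B computes the element count in closed form and generates by index, instead of A's two while-loops.
-- Pre_ excludes step = 0, where the Python raises ValueError (both A and B raise there).


-- ===== PORT A =====
-- while i < stop: result.append(i); i += step
def loopUp (stop step : Int) (h : 0 < step) (i : Int) (result : List Int) : List Int :=
  if i < stop then loopUp stop step h (i + step) (result ++ [i]) else result
termination_by (stop - i).toNat
decreasing_by omega

-- while i > stop: result.append(i); i += step
def loopDown (stop step : Int) (h : step < 0) (i : Int) (result : List Int) : List Int :=
  if i > stop then loopDown stop step h (i + step) (result ++ [i]) else result
termination_by (i - stop).toNat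
decreasing_by omega

def my_range (stop : Int) (start : Int) (step : Int) : List Int :=
  if _h0 : step = 0 then []  -- raise ValueError("my_range() arg 3 must not be zero.") — excluded by Pre_
  else if h1 : step > 0 then loopUp stop step h1 start []
  else loopDown stop step (by omega) start []

-- ===== PORT B =====
def my_range_alt (stop : Int) (start : Int) (step : Int) : List Int :=
  let n : Int :=
    if step > 0 then PySem.Int.floordiv (stop - start + step - 1) step
    else PySem.Int.floordiv (stop - start + step + 1) step
  let n := max n 0
  (List.range n.toNat).map (fun i : Nat => start + (i : Int) * step)

-- ===== PRECONDITION & SPEC =====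
-- step = 0 makes the Python raise ValueError; everything else returns normally.
def Pre_my_range (stop : Int) (start : Int) (step : Int) : Prop := step ≠ 0
instance (stop : Int) (start : Int) (step : Int) : Decidable (Pre_my_range stop start step) := by unfold Pre_my_range; infer_instance
def pvWitness_my_range : Int × Int × Int := (7, 1, 2)

def Spec_my_range (stop : Int) (start : Int) (step : Int) (out : List Int) : Prop := out = my_range_alt stop start step
instance (stop : Int) (start : Int) (step : Int) (out : List Int) : Decidable (Spec_my_range stop start step out) := by unfold Spec_my_range; infer_instance

-- ===== CLAIM (what is proved, stated in full; the proofs are below) =====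
def Claim_equal_my_range : Prop := ∀ (stop : Int) (start : Int) (step : Int), Dom_my_range stop start step → Pre_my_range stop start step → Spec_my_range stop start step (my_range stop start step)

-- ===== LEMMAS AND PROOFS =====

lemma floordiv_sub_self (x b : Int) (hb : b ≠ 0) :
    PySem.Int.floordiv (x - b) b = PySem.Int.floordiv x b - 1 := by
  have h := PySem.Int.floordiv_mul_add_mod x b
  have h2 := PySem.Int.floordiv_mul_add_mod (x - b) b
  rcases lt_or_gt_of_ne hb with hneg | hpos
  · have m1 := PySem.Int.mod_neg_bounds x hneg
    have m2 := PySem.Int.mod_neg_bounds (x - b) hneg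
    nlinarith [sq_nonneg (PySem.Int.floordiv (x - b) b - PySem.Int.floordiv x b + 1)]
  · have m1a := PySem.Int.mod_nonneg x hpos
    have m1b := PySem.Int.mod_lt x hpos
    have m2a := PySem.Int.mod_nonneg (x - b) hpos
    have m2b := PySem.Int.mod_lt (x - b) hpos
    nlinarith [sq_nonneg (PySem.Int.floordiv (x - b) b - PySem.Int.floordiv x b + 1)]

lemma range_succ_map (f : Nat → Int) (n : Nat) :
    (List.range (n + 1)).map f = f 0 :: (List.range n).map (fun k => f (k + 1)) := by
  rw [List.range_succ_eq_map, List.map_cons, List.map_map]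
  rfl

lemma loopUp_eq (n : Nat) : ∀ (stop step i : Int) (h : 0 < step) (acc : List Int),
    (PySem.Int.floordiv (stop - i + step - 1) step).toNat = n →
    loopUp stop step h i acc = acc ++ (List.range n).map (fun k : Nat => i + (k : Int) * step) := by
  induction n with
  | zero =>
    intro stop step i h acc hn
    rw [loopUp]
    have : ¬ i < stop := by
      intro hlt
      have : (1 : Int) ≤ PySem.Int.floordiv (stop - i + step - 1) step :=
        (PySem.Int.le_floordiv_iff_mul_le h).mpr (by omega)
      omega
    simp [this]
  | succ n ih =>
    intro stop step i h acc hn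
    have hlt : i < stop := by
      by_contra hge
      have : PySem.Int.floordiv (stop - i + step - 1) step < 1 :=
        (PySem.Int.floordiv_lt_iff_lt_mul h).mpr (by omega)
      omega
    rw [loopUp, if_pos hlt]
    have hstep : (PySem.Int.floordiv (stop - (i + step) + step - 1) step).toNat = n := by
      have : stop - (i + step) + step - 1 = (stop - i + step - 1) - step := by ring
      rw [this, floordiv_sub_self _ _ (by omega)]
      have h1 : (1 : Int) ≤ PySem.Int.floordiv (stop - i + step - 1) step :=
        (PySem.Int.le_floordiv_iff_mul_le h).mpr (by omega)
      omega
    rw [ih stop step (i + step) h (acc ++ [i]) hstep]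
    rw [range_succ_map (fun k : Nat => i + (k : Int) * step) n]
    simp only [List.append_assoc, List.singleton_append, Nat.cast_zero, zero_mul, add_zero]
    congr 2
    apply List.map_congr_left
    intro k _
    push_cast
    ring

lemma loopDown_eq (n : Nat) : ∀ (stop step i : Int) (h : step < 0) (acc : List Int),
    (PySem.Int.floordiv (stop - i + step + 1) step).toNat = n →
    loopDown stop step h i acc = acc ++ (List.range n).map (fun k : Nat => i + (k : Int) * step) := by
  induction n with
  | zero =>
    intro stop step i h acc hn
    rw [loopDown]
    have : ¬ i > stop := by
      intro hgt
      have : (1 : Int) ≤ PySem.Int.floordiv (stop - i + step + 1) step := by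
        rw [← PySem.Int.floordiv_neg_neg (stop - i + step + 1) step]
        exact (PySem.Int.le_floordiv_iff_mul_le (by omega)).mpr (by omega)
      omega
    simp [this]
  | succ n ih =>
    intro stop step i h acc hn
    have hgt : i > stop := by
      by_contra hle
      have : PySem.Int.floordiv (stop - i + step + 1) step < 1 := by
        rw [← PySem.Int.floordiv_neg_neg (stop - i + step + 1) step]
        exact (PySem.Int.floordiv_lt_iff_lt_mul (by omega)).mpr (by omega)
      omega
    rw [loopDown, if_pos hgt]
    have hstep : (PySem.Int.floordiv (stop - (i + step) + step + 1) step).toNat = n := by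
      have : stop - (i + step) + step + 1 = (stop - i + step + 1) - step := by ring
      rw [this, floordiv_sub_self _ _ (by omega)]
      have h1 : (1 : Int) ≤ PySem.Int.floordiv (stop - i + step + 1) step := by
        rw [← PySem.Int.floordiv_neg_neg (stop - i + step + 1) step]
        exact (PySem.Int.le_floordiv_iff_mul_le (by omega)).mpr (by omega)
      omega
    rw [ih stop step (i + step) h (acc ++ [i]) hstep]
    rw [range_succ_map (fun k : Nat => i + (k : Int) * step) n]
    simp only [List.append_assoc, List.singleton_append, Nat.cast_zero, zero_mul, add_zero]
    congr 2
    apply List.map_congr_left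
    intro k _
    push_cast
    ring

-- ===== VERDICT (by name: the statement is the Claim_ definition above) =====
theorem my_range_spec : Claim_equal_my_range := by
  intro stop start step _hdom hpre
  unfold Spec_my_range my_range my_range_alt
  rw [dif_neg hpre]
  rcases lt_or_gt_of_ne hpre with hneg | hpos
  · rw [dif_neg (by omega)]
    rw [loopDown_eq (PySem.Int.floordiv (stop - start + step + 1) step).toNat stop step start hneg [] rfl]
    simp only [if_neg (by omega : ¬ step > 0), List.nil_append]
    have hmax : (max (PySem.Int.floordiv (stop - start + step + 1) step) 0).toNat
        = (PySem.Int.floordiv (stop - start + step + 1) step).toNat := by omega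
    rw [hmax]
  · rw [dif_pos hpos]
    rw [loopUp_eq (PySem.Int.floordiv (stop - start + step - 1) step).toNat stop step start hpos [] rfl]
    simp only [if_pos hpos, List.nil_append]
    have hmax : (max (PySem.Int.floordiv (stop - start + step - 1) step) 0).toNat
        = (PySem.Int.floordiv (stop - start + step - 1) step).toNat := by omega
    rw [hmax]
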